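-- pv_equiv track=rewrite | github.com/JaelinB/Movie-Data | Proj 8/Proj 8.py | find_max_friends
-- ===== SOURCE A (Python) =====
-- def find_max_friends(names_lst, friends_lst):
--
--     num_friends = []
--
--     for friend in friends_lst:
--         num_friends.append(len(friend))
--
--     max_find = max(num_friends)
--
--     max_names = []
--     for i in range(len(num_friends)):
--         if num_friends[i] == max_find:
--             max_names.append(names_lst[i])
--
--     return sorted(max_names),max_find
-- ===== SOURCE B (Python) =====
-- def find_max_friends(names_lst, friends_lst):
--     if not friends_lst:
--         raise ValueError("max() arg is an empty sequence")
--     best = -1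
--     bucket = []
--     for i, friends in enumerate(friends_lst):
--         n = len(friends)
--         if n > best:
--             best = n
--             bucket = [names_lst[i]]
--         elif n == best:
--             bucket.append(names_lst[i])
--     return sorted(bucket), best
-- ===== Notes on version B (the rewrite author's own statement) =====
-- stated objective: alternative
-- what changed: Replaces A's three passes (build a parallel lengths list, take max(), then an index-based filter scan) by a single pass over enumerate(friends_lst) that keeps a running maximum count and a bucket of names, resetting the bucket whenever a strictly larger count appears.
import Mathlib
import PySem

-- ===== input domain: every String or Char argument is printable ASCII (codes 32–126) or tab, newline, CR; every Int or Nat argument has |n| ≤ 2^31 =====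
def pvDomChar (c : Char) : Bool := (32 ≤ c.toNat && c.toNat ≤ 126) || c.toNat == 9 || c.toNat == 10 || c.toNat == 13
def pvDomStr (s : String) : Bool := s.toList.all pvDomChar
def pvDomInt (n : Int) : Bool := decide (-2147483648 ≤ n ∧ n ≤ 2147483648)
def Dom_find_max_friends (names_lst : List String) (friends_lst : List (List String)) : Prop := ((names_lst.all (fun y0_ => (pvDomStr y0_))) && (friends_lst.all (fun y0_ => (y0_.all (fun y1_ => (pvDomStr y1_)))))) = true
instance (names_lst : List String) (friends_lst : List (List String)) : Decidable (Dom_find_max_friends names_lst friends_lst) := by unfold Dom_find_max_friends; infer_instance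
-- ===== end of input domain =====

-- B replaces A's three passes (lengths list, max(), index-filter scan) by ONE pass keeping a
-- running maximum and a bucket of names that is reset whenever a larger count appears (objective:
-- alternative decomposition, same O(n) cost).

-- ===== PORT A =====
def find_max_friends (names_lst : List String) (friends_lst : List (List String)) : List String × Int :=
  let num_friends : List Int := friends_lst.foldl (fun acc friend => acc ++ [(friend.length : Int)]) []
  match PySem.List.max? num_friends (fun y => y) with
  | none => ([], 0)  -- Python: max([]) raises ValueError; excluded by Pre_
  | some max_find =>
    -- range(len(num_friends)) yields nonnegative indices, so Nat List.range is exact;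
    -- names_lst[i] raises IndexError when i is out of range (excluded by Pre_), getD "" stands in.
    let max_names : List String :=
      (List.range num_friends.length).foldl
        (fun acc i => if num_friends.getD i 0 = max_find then acc ++ [names_lst.getD i ""] else acc) []
    (PySem.List.sorted max_names (fun x => x) false, max_find)

-- ===== PORT B =====
def find_max_friends_alt (names_lst : List String) (friends_lst : List (List String)) : List String × Int :=
  match friends_lst with
  | [] => ([], 0)  -- Python B raises ValueError here; excluded by Pre_
  | _ :: _ =>
    let st :=
      (PySem.List.enumerate friends_lst).foldl
        (fun (st : Int × List String) p =>
          let n : Int := p.2.length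
          if st.1 < n then (n, [PySem.List.pyGetD names_lst p.1 ""])
          else if n = st.1 then (st.1, st.2 ++ [PySem.List.pyGetD names_lst p.1 ""])
          else st)
        ((-1 : Int), ([] : List String))
    (PySem.List.sorted st.2 (fun x => x) false, st.1)

-- ===== PRECONDITION & SPEC =====
-- Pre_ excludes exactly the inputs where the Python raises: empty friends_lst (ValueError from
-- max) and inputs where some index carrying the maximal friend count falls outside names_lst
-- (IndexError, in both A and B).
def Pre_find_max_friends (names_lst : List String) (friends_lst : List (List String)) : Prop :=
  friends_lst ≠ [] ∧ ∀ i < friends_lst.length,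
    ((friends_lst.getD i []).length : Int)
        = (friends_lst.map (fun f => (f.length : Int))).foldl max (-1) →
      i < names_lst.length
instance (names_lst : List String) (friends_lst : List (List String)) : Decidable (Pre_find_max_friends names_lst friends_lst) := by unfold Pre_find_max_friends; infer_instance

def pvWitness_find_max_friends : List String × List (List String) :=
  (["bea", "ann", "cal"], [["x"], ["x", "y"], ["u", "v"]])

def Spec_find_max_friends (names_lst : List String) (friends_lst : List (List String)) (out : List String × Int) : Prop := out = find_max_friends_alt names_lst friends_lst
instance (names_lst : List String) (friends_lst : List (List String)) (out : List String × Int) : Decidable (Spec_find_max_friends names_lst friends_lst out) := by unfold Spec_find_max_friends; infer_instance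

-- ===== CLAIM (what is proved, stated in full; the proofs are below) =====
def Claim_equal_find_max_friends : Prop := ∀ (names_lst : List String) (friends_lst : List (List String)), Dom_find_max_friends names_lst friends_lst → Pre_find_max_friends names_lst friends_lst → Spec_find_max_friends names_lst friends_lst (find_max_friends names_lst friends_lst)

-- ===== LEMMAS AND PROOFS =====

-- Reference value shared by the two proofs: the names at the positions (counted from k) whose
-- friend count equals M, in position order.
def pvCollect (names : List String) (M : Int) : List (List String) → Nat → List String
  | [], _ => []
  | x :: rest, k =>
      (if (x.length : Int) = M then [names.getD k ""] else []) ++ pvCollect names M rest (k + 1)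

-- The maximum of b and the friend counts of l (A's max / B's running maximum).
def pvMaxLens (l : List (List String)) (b : Int) : Int :=
  (l.map (fun f => (f.length : Int))).foldl max b

lemma pvMaxLens_nil (b : Int) : pvMaxLens [] b = b := rfl

lemma pvMaxLens_cons (x : List String) (rest : List (List String)) (b : Int) :
    pvMaxLens (x :: rest) b = pvMaxLens rest (max b (x.length : Int)) := rfl

lemma le_pvMaxLens (l : List (List String)) (b : Int) : b ≤ pvMaxLens l b := by
  induction l generalizing b with
  | nil => simp [pvMaxLens_nil]
  | cons x rest ih =>
      rw [pvMaxLens_cons]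
      exact le_trans (le_max_left _ _) (ih _)

-- B's loop, characterised: running maximum plus the collected bucket.
lemma foldB_eq (names : List String) (l : List (List String)) :
    ∀ (k : Nat) (b : Int) (acc : List String),
      (PySem.List.enumerate l (k : Int)).foldl
        (fun (st : Int × List String) p =>
          if st.1 < (p.2.length : Int) then ((p.2.length : Int), [PySem.List.pyGetD names p.1 ""])
          else if (p.2.length : Int) = st.1 then (st.1, st.2 ++ [PySem.List.pyGetD names p.1 ""])
          else st)
        (b, acc)
      = (pvMaxLens l b,
         (if b = pvMaxLens l b then acc else []) ++ pvCollect names (pvMaxLens l b) l k) := by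
  induction l with
  | nil => intro k b acc; simp [PySem.List.enumerate_nil, pvMaxLens_nil, pvCollect]
  | cons x rest ih =>
      intro k b acc
      rw [PySem.List.enumerate_cons, List.foldl_cons]
      have hk1 : ((k : Int) + 1) = ((k + 1 : Nat) : Int) := by push_cast; ring
      rw [pvMaxLens_cons]
      by_cases h1 : b < (x.length : Int)
      · have hmax : max b (x.length : Int) = (x.length : Int) := max_eq_right (le_of_lt h1)
        have hbne : b ≠ pvMaxLens rest (x.length : Int) := by
          have := le_pvMaxLens rest (x.length : Int)
          intro he; omega
        simp only [if_pos h1, hk1, hmax]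
        rw [ih (k + 1) (x.length : Int) [PySem.List.pyGetD names ((k : Nat) : Int) ""]]
        simp only [pvCollect, if_neg hbne, PySem.List.pyGetD_natCast]
        simp
      · have hmax : max b (x.length : Int) = b := max_eq_left (by omega)
        by_cases h2 : (x.length : Int) = b
        · subst h2
          simp only [if_neg h1, if_true, hk1, hmax]
          rw [ih (k + 1) (x.length : Int) (acc ++ [PySem.List.pyGetD names ((k : Nat) : Int) ""])]
          by_cases hb : (x.length : Int) = pvMaxLens rest (x.length : Int)
          · simp only [pvCollect, if_pos hb, PySem.List.pyGetD_natCast]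
            simp
          · simp only [pvCollect, if_neg hb]
            simp
        · have hxne : (x.length : Int) ≠ pvMaxLens rest b := by
            have := le_pvMaxLens rest b
            intro he; omega
          simp only [if_neg h1, if_neg h2, hk1, hmax]
          rw [ih (k + 1) b acc]
          simp [pvCollect, hxne]

-- A's filter loop, characterised by the same collector (indices shifted by k).
lemma foldA_eq (names : List String) (M : Int) (l : List (List String)) :
    ∀ (k : Nat) (acc : List String),
      (List.range l.length).foldl
        (fun acc i => if ((l.getD i []).length : Int) = M
                      then acc ++ [names.getD (k + i) ""] else acc) acc
      = acc ++ pvCollect names M l k := by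
  induction l with
  | nil => intro k acc; simp [pvCollect]
  | cons x rest ih =>
      intro k acc
      rw [List.length_cons, List.range_succ_eq_map, List.foldl_cons, List.foldl_map]
      have hstep :
          (fun (acc : List String) (i : Nat) =>
              if (((x :: rest).getD (i + 1) []).length : Int) = M
              then acc ++ [names.getD (k + (i + 1)) ""] else acc)
          = (fun (acc : List String) (i : Nat) =>
              if ((rest.getD i []).length : Int) = M
              then acc ++ [names.getD ((k + 1) + i) ""] else acc) := by
        funext a i
        have : k + (i + 1) = (k + 1) + i := by omega
        simp [this]
      simp only [Nat.succ_eq_add_one, hstep]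
      by_cases hx : ((x.length : Int) = M)
      · simp only [List.getD_cons_zero, hx, if_true, Nat.add_zero]
        rw [ih (k + 1) (acc ++ [names.getD k ""])]
        simp [pvCollect, hx]
      · simp only [List.getD_cons_zero, hx, if_false, Nat.add_zero]
        rw [ih (k + 1) acc]
        simp [pvCollect, hx]

-- A's lengths list is just the map of lengths.
lemma numFriends_eq (l : List (List String)) :
    l.foldl (fun acc friend => acc ++ [(friend.length : Int)]) []
      = l.map (fun f => (f.length : Int)) := by
  simpa using PySem.List.foldl_append_singleton_eq_map
    (l := l) (f := fun f => (f.length : Int)) (acc := [])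

-- ===== VERDICT (by name: the statement is the Claim_ definition above) =====
theorem find_max_friends_spec : Claim_equal_find_max_friends := by
  intro names_lst friends_lst _ hpre
  obtain ⟨hne, -⟩ := hpre
  unfold Spec_find_max_friends
  obtain ⟨h, t, rfl⟩ : ∃ h t, friends_lst = h :: t := by
    cases friends_lst with
    | nil => exact absurd rfl hne
    | cons h t => exact ⟨h, t, rfl⟩
  -- the common maximum
  have hM : pvMaxLens (h :: t) (-1) = pvMaxLens t (h.length : Int) := by
    rw [pvMaxLens_cons]
    have : max (-1 : Int) (h.length : Int) = (h.length : Int) :=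
      max_eq_right (by omega)
    rw [this]
  -- A side
  simp only [find_max_friends]
  rw [numFriends_eq]
  have hmax? :
      PySem.List.max? ((h :: t).map (fun f => (f.length : Int))) (fun y => y)
        = some (pvMaxLens t (h.length : Int)) := by
    rw [List.map_cons, PySem.List.max?_id_cons]
    rfl
  simp only [hmax?]
  have hlen : ((h :: t).map (fun f => (f.length : Int))).length = (h :: t).length := by
    simp
  have hgetD : ∀ (i : Nat),
      ((h :: t).map (fun f => (f.length : Int))).getD i 0
        = (((h :: t).getD i []).length : Int) := by
    intro i
    rw [List.getD_eq_getElem?_getD, List.getD_eq_getElem?_getD, List.getElem?_map]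
    cases hx : (h :: t)[i]? <;> simp
  have hAfold :
      (List.range ((h :: t).map (fun f => (f.length : Int))).length).foldl
        (fun acc i => if ((h :: t).map (fun f => (f.length : Int))).getD i 0
                          = pvMaxLens t (h.length : Int)
                      then acc ++ [names_lst.getD i ""] else acc) []
        = pvCollect names_lst (pvMaxLens t (h.length : Int)) (h :: t) 0 := by
    rw [hlen]
    have hcongr :
        (fun (acc : List String) (i : Nat) =>
            if ((h :: t).map (fun f => (f.length : Int))).getD i 0
                = pvMaxLens t (h.length : Int)
            then acc ++ [names_lst.getD i ""] else acc)
        = (fun (acc : List String) (i : Nat) =>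
            if (((h :: t).getD i []).length : Int) = pvMaxLens t (h.length : Int)
            then acc ++ [names_lst.getD (0 + i) ""] else acc) := by
      funext a i
      rw [hgetD i, Nat.zero_add]
    rw [hcongr, foldA_eq names_lst (pvMaxLens t (h.length : Int)) (h :: t) 0 []]
    simp
  rw [hAfold]
  -- B side
  simp only [find_max_friends_alt]
  have hfold := foldB_eq names_lst (h :: t) 0 (-1) []
  simp only [Nat.cast_zero] at hfold
  rw [hfold, hM]
  have hne1 : (-1 : Int) ≠ pvMaxLens t (h.length : Int) := by
    have h1 : (h.length : Int) ≤ pvMaxLens t (h.length : Int) := le_pvMaxLens _ _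
    intro he; omega
  simp [hne1]
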